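-- pv_equiv track=rewrite | github.com/djetelina/aoc23 | 9.py | extrapolate_back
-- ===== SOURCE A (Python) =====
-- def extrapolate(sequence):
--     if all([i == 0 for i in sequence]):
--         return 0
--     lower_sequence = []
--     for a, b in enumerate(sequence):
--         if a == 0:
--             continue
--         else:
--             lower_sequence.append(b - sequence[a-1])
--     next_lower = extrapolate(lower_sequence)
--     return sequence[-1] + next_lower
--
-- def extrapolate_back(sequence):
--     if all([i == 0 for i in sequence]):
--         return 0
--     lower_sequence = []
--     for a, b in enumerate(sequence):
--         if a == len(sequence) - 1:
--             continue
--         else: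
--             lower_sequence.insert(0, sequence[a+1] - b)
--     next_lower = extrapolate(lower_sequence)
--     return sequence[0] - next_lower
-- ===== SOURCE B (Python) =====
-- def extrapolate_back(sequence):
--     # Newton backward extrapolation: previous term = sum_{k} (-1)^k * C(n, k+1) * sequence[k],
--     # with the binomial coefficient updated incrementally. One pass, O(n).
--     n = len(sequence)
--     total = 0
--     c = n          # C(n, 1)
--     sign = 1
--     for k, v in enumerate(sequence):
--         total += sign * c * v
--         c = c * (n - 1 - k) // (k + 2)   # C(n, k+2)
--         sign = -sign
--     return total
-- ===== Notes on version B (the rewrite author's own statement) =====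
-- stated objective: faster
-- what changed: Replaced the recursive repeated-difference-table extrapolation with Newton's finite-difference closed form: a single pass computing the binomial-weighted alternating sum sum_k (-1)^k C(n,k+1) s[k], with the binomials updated incrementally.
import Mathlib
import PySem

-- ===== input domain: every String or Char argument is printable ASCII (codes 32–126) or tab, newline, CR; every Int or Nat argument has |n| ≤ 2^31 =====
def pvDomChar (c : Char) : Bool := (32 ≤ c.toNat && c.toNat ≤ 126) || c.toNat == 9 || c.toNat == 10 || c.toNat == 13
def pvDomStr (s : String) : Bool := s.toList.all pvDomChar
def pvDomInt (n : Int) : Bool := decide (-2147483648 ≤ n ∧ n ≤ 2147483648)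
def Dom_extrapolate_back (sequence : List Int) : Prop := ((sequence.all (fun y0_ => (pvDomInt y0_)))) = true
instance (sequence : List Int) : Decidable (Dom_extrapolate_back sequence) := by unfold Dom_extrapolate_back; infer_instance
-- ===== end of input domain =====

-- B replaces A's recursive difference-table extrapolation by Newton's finite-difference
-- closed form, a single binomial-weighted pass over the input (objective: faster).

-- ===== PORT A =====
-- the loop of `extrapolate` building `lower_sequence`; the index a-1 is always in range
-- (a ≥ 1 on the appending branch), so `pyGet?` is `some` and the `.getD 0` is unreachable
def pyLowerFwd (sequence : List Int) : List Int :=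
  (PySem.List.enumerate sequence).foldl
    (fun lower ab =>
      if ab.1 == 0 then lower
      else lower ++ [ab.2 - (PySem.List.pyGet? sequence (ab.1 - 1)).getD 0]) []

-- loop-shape lemma the port cites for termination: the lower sequence is the
-- adjacent-difference list (one element shorter)
theorem pyLowerFwd_eq (xs : List Int) :
    pyLowerFwd xs = List.zipWith (fun b a => b - a) xs.tail xs := by
  cases xs with
  | nil => rfl
  | cons x t =>
    unfold pyLowerFwd
    rw [PySem.List.enumerate_cons, List.foldl_cons]
    simp only [beq_self_eq_true, if_pos, zero_add]
    rw [PySem.List.foldl_congr_mem _ _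
      (fun lower ab => lower ++ [ab.2 - (PySem.List.pyGet? (x :: t) (ab.1 - 1)).getD 0]) _
      (by
        intro acc ab hab
        rw [PySem.List.mem_enumerate_iff] at hab
        obtain ⟨k, hk, rfl⟩ := hab
        have : ((1 : Int) + ↑k == 0) = false := by simp; omega
        rw [this]
        simp)]
    rw [PySem.List.foldl_append_singleton_eq_map, List.nil_append]
    apply List.ext_getElem
    · simp [PySem.List.length_enumerate, List.length_zipWith]
    · intro k h1 h2
      have hk : k < t.length := by
        simpa [PySem.List.length_enumerate] using h1
      rw [List.getElem_map, PySem.List.getElem_enumerate]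
      rw [List.getElem_zipWith]
      simp only [List.tail_cons]
      have : (1 : Int) + ↑k - 1 = ((k : Nat) : Int) := by omega
      rw [this, PySem.List.pyGet?_natCast]
      rw [List.getElem?_eq_getElem (by simp; omega)]
      simp

def extrapolate (sequence : List Int) : Int :=
  if sequence.all (fun i => i == 0) then 0
  else
    let next_lower := extrapolate (pyLowerFwd sequence)
    -- sequence[-1]: sequence is nonempty here (the all-zero check failed), so in range
    (PySem.List.pyGet? sequence (-1)).getD 0 + next_lower
termination_by sequence.length
decreasing_by
  rename_i h
  rw [pyLowerFwd_eq]
  cases sequence with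
  | nil => simp at h
  | cons x t => simp [List.length_zipWith]

-- the loop of `extrapolate_back`: skips the last index, prepends sequence[a+1] - b
-- (the index a+1 is in range on that branch, so again the `.getD 0` is unreachable)
def pyLowerBack (sequence : List Int) : List Int :=
  (PySem.List.enumerate sequence).foldl
    (fun lower ab =>
      if ab.1 == PySem.List.len sequence - 1 then lower
      else PySem.List.insert lower 0 ((PySem.List.pyGet? sequence (ab.1 + 1)).getD 0 - ab.2)) []

def extrapolate_back (sequence : List Int) : Int :=
  if sequence.all (fun i => i == 0) then 0
  else
    let next_lower := extrapolate (pyLowerBack sequence)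
    -- sequence[0]: sequence is nonempty here, so in range
    (PySem.List.pyGet? sequence 0).getD 0 - next_lower

-- ===== PORT B =====
-- state (total, c, sign); c is updated by the exact integer division of Source B
def extrapolate_back_alt (sequence : List Int) : Int :=
  let n : Int := PySem.List.len sequence
  ((PySem.List.enumerate sequence).foldl
    (fun (st : Int × Int × Int) kv =>
      (st.1 + st.2.2 * st.2.1 * kv.2,
       PySem.Int.floordiv (st.2.1 * (n - 1 - kv.1)) (kv.1 + 2),
       -st.2.2)) ((0 : Int), n, (1 : Int))).1

-- ===== PRECONDITION & SPEC =====
def Spec_extrapolate_back (sequence : List Int) (out : Int) : Prop := out = extrapolate_back_alt sequence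
instance (sequence : List Int) (out : Int) : Decidable (Spec_extrapolate_back sequence out) := by unfold Spec_extrapolate_back; infer_instance

-- ===== CLAIM (what is proved, stated in full; the proofs are below) =====
def Claim_equal_extrapolate_back : Prop := ∀ (sequence : List Int), Dom_extrapolate_back sequence → Spec_extrapolate_back sequence (extrapolate_back sequence)

-- ===== LEMMAS AND PROOFS =====

-- Newton's binomial-weighted sum over a list (coefficients taken at its own length):
-- both programs are proved equal to `nsum` of the input
def nsum (xs : List Int) : Int :=
  ∑ k ∈ Finset.range xs.length, (-1 : Int) ^ k * (xs.length.choose (k + 1) : Int) * xs.getD k 0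

theorem nsum_eq_zero_of_all_zero (xs : List Int) (h : xs.all (fun i => i == 0) = true) :
    nsum xs = 0 := by
  unfold nsum
  apply Finset.sum_eq_zero
  intro k hk
  rw [Finset.mem_range] at hk
  have : xs.getD k 0 = 0 := by
    rw [List.getD_eq_getElem?_getD, List.getElem?_eq_getElem hk]
    simp only [Option.getD_some]
    have := List.all_eq_true.mp h (xs[k]) (List.getElem_mem hk)
    simpa using this
  rw [this, mul_zero]

theorem nsum_neg (zs : List Int) : nsum (zs.map (fun z => -z)) = - nsum zs := by
  unfold nsum
  rw [List.length_map, ← Finset.sum_neg_distrib]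
  apply Finset.sum_congr rfl
  intro k hk
  rw [Finset.mem_range] at hk
  rw [List.getD_eq_getElem?_getD, List.getD_eq_getElem?_getD, List.getElem?_map]
  rw [List.getElem?_eq_getElem hk]
  simp [mul_neg]

-- differences of the reversal are the negated, reversed differences
theorem diffs_reverse (xs : List Int) :
    List.zipWith (fun b a => b - a) xs.reverse.tail xs.reverse
      = ((List.zipWith (fun b a => b - a) xs.tail xs).reverse).map (fun z => -z) := by
  apply List.ext_getElem
  · simp [List.length_zipWith, List.length_tail]
  · intro k h1 h2
    have hk : k < xs.length - 1 := by
      simpa [List.length_zipWith] using h1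
    rw [List.getElem_zipWith, List.getElem_map, List.getElem_reverse, List.getElem_reverse,
      List.getElem_zipWith]
    have ht1 : xs.reverse.tail[k]'(by simp; omega)
        = xs[xs.length - 2 - k]'(by omega) := by
      rw [List.getElem_tail, List.getElem_reverse]
      congr 1
      omega
    have ht3 : xs.tail[(List.zipWith (fun b a => b - a) xs.tail xs).length - 1 - k]'(by
          simp [List.length_zipWith, List.length_tail]; omega)
        = xs[xs.length - 1 - k]'(by omega) := by
      rw [List.getElem_tail]
      congr 1
      simp [List.length_zipWith, List.length_tail]
      omega
    have ht4 : xs[(List.zipWith (fun b a => b - a) xs.tail xs).length - 1 - k]'(by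
          simp [List.length_zipWith, List.length_tail]; omega)
        = xs[xs.length - 2 - k]'(by omega) := by
      congr 1
      simp [List.length_zipWith, List.length_tail]
      omega
    rw [ht1, ht3, ht4]
    ring

-- the Pascal-triangle core of Newton's identity, stated over abstract entry functions
theorem newton_key (m : Nat) (f g : Nat → Int) (x : Int)
    (hg0 : g 0 = x) (hgs : ∀ k, g (k + 1) = f k) :
    ∑ k ∈ Finset.range (m + 1), (-1 : Int) ^ k * ((m + 1).choose (k + 1) : Int) * g k
      = x - ∑ k ∈ Finset.range m, (-1 : Int) ^ k * (m.choose (k + 1) : Int) * (f k - g k) := by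
  have hS2 : ∑ k ∈ Finset.range m, (-1 : Int) ^ k * (m.choose (k + 1) : Int) * g k
      = (m : Int) * x + ∑ k ∈ Finset.range m, (-1 : Int) ^ (k + 1) * (m.choose (k + 2) : Int) * f k := by
    cases m with
    | zero => simp
    | succ m' =>
      rw [Finset.sum_range_succ']
      simp only [hgs, hg0, pow_zero, one_mul, zero_add, Nat.choose_one_right]
      rw [Finset.sum_range_succ (fun k => (-1 : Int) ^ (k + 1) * (((m' + 1).choose (k + 2) : Nat) : Int) * f k) m']
      have hz : (((m' + 1).choose (m' + 2) : Nat) : Int) = 0 := by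
        rw [Nat.choose_eq_zero_of_lt (by omega)]; simp
      rw [hz]
      push_cast [Nat.choose_one_right]; ring
  have h1 : ∑ k ∈ Finset.range m, (-1 : Int) ^ k * (m.choose (k + 1) : Int) * (f k - g k)
      = (∑ k ∈ Finset.range m, (-1 : Int) ^ k * (m.choose (k + 1) : Int) * f k)
        - (∑ k ∈ Finset.range m, (-1 : Int) ^ k * (m.choose (k + 1) : Int) * g k) := by
    rw [← Finset.sum_sub_distrib]
    apply Finset.sum_congr rfl
    intros; ring
  rw [Finset.sum_range_succ']
  simp only [hgs, hg0, pow_zero, one_mul, zero_add, Nat.choose_one_right]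
  rw [h1, hS2]
  have h2 : ∑ k ∈ Finset.range m, (-1 : Int) ^ (k + 1) * (((m + 1).choose (k + 1 + 1) : Nat) : Int) * f k
      = (∑ k ∈ Finset.range m, (-1 : Int) ^ (k + 1) * ((m.choose (k + 2) : Nat) : Int) * f k)
        - (∑ k ∈ Finset.range m, (-1 : Int) ^ k * ((m.choose (k + 1) : Nat) : Int) * f k) := by
    rw [← Finset.sum_sub_distrib]
    apply Finset.sum_congr rfl
    intro k _
    have : (m + 1).choose (k + 2) = m.choose (k + 1) + m.choose (k + 2) := Nat.choose_succ_succ m (k + 1)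
    rw [show k + 1 + 1 = k + 2 from rfl, this]
    push_cast; ring
  rw [h2]
  push_cast [Nat.choose_one_right]; ring

-- Newton's backward step: nsum (x :: t) = x - nsum (differences of (x :: t))
theorem newton_step (x : Int) (t : List Int) :
    nsum (x :: t) = x - nsum (List.zipWith (fun b a => b - a) t (x :: t)) := by
  unfold nsum
  have hd : (List.zipWith (fun b a => b - a) t (x :: t)).length = t.length := by
    simp [List.length_zipWith]
  rw [hd, List.length_cons]
  have hrw : ∑ k ∈ Finset.range t.length, (-1 : Int) ^ k * (t.length.choose (k + 1) : Int)
        * (List.zipWith (fun b a => b - a) t (x :: t)).getD k 0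
      = ∑ k ∈ Finset.range t.length, (-1 : Int) ^ k * (t.length.choose (k + 1) : Int)
        * ((fun k => t.getD k 0) k - (fun k => (x :: t).getD k 0) k) := by
    apply Finset.sum_congr rfl
    intro k hk
    rw [Finset.mem_range] at hk
    congr 1
    rw [List.getD_eq_getElem?_getD, List.getElem?_eq_getElem (by omega : k < (List.zipWith (fun b a => b - a) t (x :: t)).length)]
    rw [List.getElem_zipWith]
    simp only [Option.getD_some]
    rw [List.getD_eq_getElem?_getD, List.getElem?_eq_getElem (by omega : k < t.length)]
    rw [List.getD_eq_getElem?_getD, List.getElem?_eq_getElem (by simp; omega : k < (x :: t).length)]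
    simp
  rw [hrw]
  exact newton_key t.length (fun k => t.getD k 0) (fun k => (x :: t).getD k 0) x rfl (fun k => rfl)

-- the back-loop builds the reversed difference list
theorem foldl_if_cons {α : Type} (p : α → Bool) (v : α → Int) :
    ∀ (l : List α) (acc : List Int),
      l.foldl (fun acc x => if p x then acc else v x :: acc) acc
        = ((l.filter (fun x => !p x)).map v).reverse ++ acc := by
  intro l
  induction l with
  | nil => simp
  | cons x t ih =>
    intro acc
    by_cases hp : p x = true
    · simp [hp, ih]
    · simp only [Bool.not_eq_true] at hp
      simp [hp, ih]

theorem pyLowerBack_eq (xs : List Int) :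
    pyLowerBack xs = (List.zipWith (fun b a => b - a) xs.tail xs).reverse := by
  cases hxs : xs with
  | nil => rfl
  | cons y ys =>
  rw [← hxs]
  have hne : xs ≠ [] := by rw [hxs]; simp
  have hlen : 1 ≤ xs.length := List.length_pos_iff.mpr hne
  unfold pyLowerBack
  rw [PySem.List.foldl_congr_mem _ _
    (fun lower ab => if (ab.1 == PySem.List.len xs - 1) then lower
      else ((PySem.List.pyGet? xs (ab.1 + 1)).getD 0 - ab.2) :: lower) _
    (by intro acc ab _; by_cases h : (ab.1 == PySem.List.len xs - 1) = true <;>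
        simp [PySem.List.insert_zero])]
  rw [foldl_if_cons]
  rw [List.append_nil]
  congr 1
  have hdl : xs.dropLast.length = xs.length - 1 := by simp
  have henum : PySem.List.enumerate xs = PySem.List.enumerate xs.dropLast 0
      ++ PySem.List.enumerate [xs.getLast hne] ((0 : Int) + ↑xs.dropLast.length) := by
    conv_lhs => rw [(List.dropLast_append_getLast hne).symm]
    rw [PySem.List.enumerate_append]
  rw [henum, List.filter_append]
  have h2 : (PySem.List.enumerate [xs.getLast hne] ((0 : Int) + ↑xs.dropLast.length)).filter
      (fun ab => !(ab.1 == PySem.List.len xs - 1)) = [] := by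
    simp [PySem.List.enumerate, PySem.List.len_eq, hdl]
    omega
  rw [h2, List.append_nil]
  have h3 : (PySem.List.enumerate xs.dropLast 0).filter
      (fun ab => !(ab.1 == PySem.List.len xs - 1)) = PySem.List.enumerate xs.dropLast 0 := by
    rw [List.filter_eq_self]
    intro ab hab
    rw [PySem.List.mem_enumerate_iff] at hab
    obtain ⟨k, hk, rfl⟩ := hab
    simp [PySem.List.len_eq]
    omega
  rw [h3]
  apply List.ext_getElem
  · simp [PySem.List.length_enumerate, List.length_zipWith, hdl]
  · intro k h1 h2'
    have hk : k < xs.length - 1 := by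
      simpa [PySem.List.length_enumerate, hdl] using h1
    rw [List.getElem_map, PySem.List.getElem_enumerate]
    rw [List.getElem_zipWith]
    simp only [zero_add]
    have : ((k : Nat) : Int) + 1 = (((k + 1 : Nat)) : Int) := by omega
    rw [this, PySem.List.pyGet?_natCast]
    rw [List.getElem?_eq_getElem (by omega)]
    rw [List.getElem_dropLast]
    have htail : xs.tail[k]'(by simp [List.length_tail]; omega) = xs[k + 1]'(by omega) := by
      rw [List.getElem_tail]
    rw [htail]
    simp

theorem pyGet_neg_one (xs : List Int) (h : xs ≠ []) :
    (PySem.List.pyGet? xs (-1)).getD 0 = xs.reverse.headD 0 := by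
  have hl : 1 ≤ xs.length := List.length_pos_iff.mpr h
  simp [PySem.List.pyGet?, PySem.List.pyIdx?, hl, ← List.getLast?_eq_getElem?,
    List.head?_reverse]

theorem extrapolate_eq (xs : List Int) : extrapolate xs = nsum xs.reverse := by
  induction xs using extrapolate.induct with
  | case1 xs h =>
    rw [extrapolate, if_pos h]
    rw [nsum_eq_zero_of_all_zero xs.reverse (by simpa using h)]
  | case2 xs h ih =>
    rw [extrapolate, if_neg h]
    simp only []
    have hne : xs ≠ [] := by
      intro h'; subst h'; simp at h
    rw [ih, pyLowerFwd_eq, pyGet_neg_one xs hne]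
    cases hrev : xs.reverse with
    | nil => exact absurd (by simpa using hrev) hne
    | cons y ys =>
      rw [newton_step]
      have hz : List.zipWith (fun b a => b - a) ys (y :: ys)
          = ((List.zipWith (fun b a => b - a) xs.tail xs).reverse).map (fun z => -z) := by
        rw [← diffs_reverse, hrev, List.tail_cons]
      rw [hz, nsum_neg]
      simp

theorem alt_loop (N : Nat) (t : List Int) : ∀ (j : Nat) (total : Int), j + t.length = N →
    ((PySem.List.enumerate t (j : Int)).foldl
      (fun (st : Int × Int × Int) kv =>
        (st.1 + st.2.2 * st.2.1 * kv.2,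
         PySem.Int.floordiv (st.2.1 * ((N : Int) - 1 - kv.1)) (kv.1 + 2),
         -st.2.2)) (total, (N.choose (j + 1) : Int), (-1 : Int) ^ j)).1
    = total + ∑ k ∈ Finset.range t.length,
        (-1 : Int) ^ (j + k) * (N.choose (j + k + 1) : Int) * t.getD k 0 := by
  induction t with
  | nil => intro j total _; simp [PySem.List.enumerate]
  | cons v t ih =>
    intro j total hj
    have hjN : j < N := by simp at hj; omega
    rw [PySem.List.enumerate_cons, List.foldl_cons]
    have hc : PySem.Int.floordiv ((N.choose (j + 1) : Int) * ((N : Int) - 1 - (j : Int))) ((j : Int) + 2)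
        = (N.choose (j + 2) : Int) := by
      have h1 : ((N : Int) - 1 - (j : Int)) = ((N - (j + 1) : Nat) : Int) := by omega
      have h2 : ((j : Int) + 2) = ((j + 2 : Nat) : Int) := by omega
      rw [h1, h2,
        show (N.choose (j + 1) : Int) * ((N - (j + 1) : Nat) : Int)
          = ((N.choose (j + 1) * (N - (j + 1)) : Nat) : Int) by push_cast; ring,
        PySem.Int.floordiv_natCast]
      congr 1
      rw [← Nat.choose_succ_right_eq N (j + 1)]
      show N.choose (j + 2) * (j + 2) / (j + 2) = N.choose (j + 2)
      exact Nat.mul_div_cancel _ (by omega)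
    simp only []
    rw [hc, show (-(-1 : Int) ^ j) = (-1 : Int) ^ (j + 1) by ring,
      show ((j : Int) + 1) = ((j + 1 : Nat) : Int) by push_cast; ring]
    rw [ih (j + 1) _ (by simp at hj ⊢; omega)]
    simp only [List.length_cons]
    rw [Finset.sum_range_succ']
    simp only [List.getD_cons_succ, List.getD_cons_zero, add_zero]
    simp only [show ∀ k, j + 1 + k = j + (k + 1) from fun k => by omega]
    ring

theorem alt_eq (xs : List Int) : extrapolate_back_alt xs = nsum xs := by
  unfold extrapolate_back_alt nsum
  simp only [PySem.List.len_eq]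
  have h := alt_loop xs.length xs 0 0 (by omega)
  simp only [Nat.cast_zero, zero_add, pow_zero, Nat.choose_one_right] at h
  simpa using h

theorem back_eq (xs : List Int) : extrapolate_back xs = nsum xs := by
  by_cases hz : (xs.all (fun i => i == 0)) = true
  · rw [extrapolate_back, if_pos hz, nsum_eq_zero_of_all_zero xs hz]
  · have hne : xs ≠ [] := by
      intro h'; subst h'; simp at hz
    rw [extrapolate_back, if_neg hz]
    simp only []
    rw [pyLowerBack_eq, extrapolate_eq, List.reverse_reverse]
    cases xs with
    | nil => exact absurd rfl hne
    | cons x t =>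
      simp only [List.tail_cons]
      rw [newton_step]
      have hhead : (PySem.List.pyGet? (x :: t) 0).getD 0 = x := by
        rw [show (0 : Int) = ((0 : Nat) : Int) by simp, PySem.List.pyGet?_natCast]
        rfl
      rw [hhead]

-- ===== VERDICT (by name: the statement is the Claim_ definition above) =====
theorem extrapolate_back_spec : Claim_equal_extrapolate_back := by
  intro sequence _
  unfold Spec_extrapolate_back
  rw [back_eq, alt_eq]
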